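-- pv_equiv track=rewrite | github.com/skochv04/algorithms-and-data-structures | task3/zad3 N^2.py | strong_string
-- ===== SOURCE A (Python) =====
-- def rownowazne(a, b):
--     A = len(a)
--     B = len(b)
--     if A != B:
--         return False
--     res = True
--     for i in range(A):
--         if a[i] != b[i]:
--             res = False
--     if res == True:
--       return res
--     res = True
--     for i in range(A):
--         if a[i] != b[B - 1 - i]:
--             res = False
--     return res
--
-- def strong_string(T):
--     n = len(T)
--     s = 1
--     for i in range(n):
--         loc_s = 0
--         for j in range(n):
--             if rownowazne(T[i], T[j]):
--                 loc_s += 1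
--         if loc_s > s:
--             s = loc_s
--     return s
-- ===== SOURCE B (Python) =====
-- def strong_string(T):
--     counts = {}
--     for s in T:
--         r = s[::-1]
--         k = s if s <= r else r
--         counts[k] = counts.get(k, 0) + 1
--     ans = 1
--     for v in counts.values():
--         if v > ans:
--             ans = v
--     return ans
-- ===== Notes on version B (the rewrite author's own statement) =====
-- stated objective: faster
-- what changed: Replaces the all-pairs O(n^2) equivalence scan with a single pass that canonicalizes each string as min(s, s[::-1]) and counts canonical keys in a dict, then takes the max count.
import Mathlib
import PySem

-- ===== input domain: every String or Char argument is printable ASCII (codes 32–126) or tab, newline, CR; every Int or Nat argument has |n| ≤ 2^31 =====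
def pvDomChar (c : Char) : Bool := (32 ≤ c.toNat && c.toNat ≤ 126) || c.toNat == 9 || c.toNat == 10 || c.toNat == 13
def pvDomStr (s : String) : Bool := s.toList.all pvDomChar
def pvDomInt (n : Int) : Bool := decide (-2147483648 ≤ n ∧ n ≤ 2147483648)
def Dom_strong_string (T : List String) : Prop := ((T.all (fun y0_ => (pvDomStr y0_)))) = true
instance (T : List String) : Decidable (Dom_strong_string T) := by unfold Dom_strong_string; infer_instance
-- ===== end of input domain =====

-- B replaces A's all-pairs quadratic scan by a single pass counting canonical keys min(s, s[::-1]) in a dict.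

-- ===== PORT A =====
def rownowazne (a b : String) : Bool :=
  let al := a.toList
  let bl := b.toList
  let A : Int := al.length
  let B : Int := bl.length
  if A ≠ B then false
  else
    let res := (PySem.List.pyRange 0 A 1).foldl
      (fun res i => if PySem.List.pyGetD al i ' ' ≠ PySem.List.pyGetD bl i ' ' then false else res) true
    if res = true then res
    else
      (PySem.List.pyRange 0 A 1).foldl
        (fun res i => if PySem.List.pyGetD al i ' ' ≠ PySem.List.pyGetD bl (B - 1 - i) ' ' then false else res) true

def strong_string (T : List String) : Int :=
  let n : Int := T.length
  (PySem.List.pyRange 0 n 1).foldl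
    (fun s i =>
      let loc_s := (PySem.List.pyRange 0 n 1).foldl
        (fun loc j => if rownowazne (PySem.List.pyGetD T i "") (PySem.List.pyGetD T j "") then loc + 1 else loc)
        (0 : Int)
      if loc_s > s then loc_s else s) 1

-- ===== PORT B =====
-- Python's `s <= r` on str is `≤` on the char lists (code-point lexicographic, exact per PYSEM).
def strong_string_alt (T : List String) : Int :=
  let counts := T.foldl
    (fun d s =>
      let r := (PySem.Str.slice? s none none (-1)).getD ""   -- s[::-1]
      let k := if s.toList ≤ r.toList then s else r
      d.insert k (d.getD k 0 + 1))
    (PySem.Dict.empty : PySem.Dict String Int)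
  counts.values.foldl (fun ans v => if v > ans then v else ans) 1

-- ===== PRECONDITION & SPEC =====
def Spec_strong_string (T : List String) (out : Int) : Prop := out = strong_string_alt T
instance (T : List String) (out : Int) : Decidable (Spec_strong_string T out) := by unfold Spec_strong_string; infer_instance

-- ===== CLAIM (what is proved, stated in full; the proofs are below) =====
def Claim_equal_strong_string : Prop := ∀ (T : List String), Dom_strong_string T → Spec_strong_string T (strong_string T)

-- ===== LEMMAS AND PROOFS =====

-- canonical representative, list level and string level
def pvCanonL (x : List Char) : List Char := if x ≤ x.reverse then x else x.reverse

def pvRev (s : String) : String := String.ofList s.toList.reverse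

def pvCanon (s : String) : String := if s.toList ≤ s.toList.reverse then s else pvRev s

theorem pvCanon_toList (s : String) : (pvCanon s).toList = pvCanonL s.toList := by
  unfold pvCanon pvCanonL pvRev
  split_ifs <;> simp

-- a "res stays true unless some p i holds" flag loop
theorem pv_flag_loop (l : List Int) (p : Int → Prop) [DecidablePred p] (b : Bool) :
    l.foldl (fun res i => if p i then false else res) b = (b && decide (∀ i ∈ l, ¬ p i)) := by
  induction l generalizing b with
  | nil => simp
  | cons x t ih =>
    simp only [List.foldl_cons, ih, List.mem_cons]
    by_cases hx : p x <;> simp [hx]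

theorem pv_eq_check (al bl : List Char) (hlen : al.length = bl.length) :
    (∀ i ∈ PySem.List.pyRange 0 (al.length : Int) 1,
        PySem.List.pyGetD al i ' ' = PySem.List.pyGetD bl i ' ') ↔ al = bl := by
  constructor
  · intro h
    apply List.ext_getElem hlen
    intro k hk hk'
    have hmem : ((k : Int)) ∈ PySem.List.pyRange 0 (al.length : Int) 1 := by
      rw [PySem.List.mem_pyRange_one]; omega
    have h3 := h _ hmem
    simpa [List.getD_eq_getElem, hk, hk'] using h3
  · rintro rfl
    intro i _; rfl

theorem pv_rev_check (al bl : List Char) (hlen : al.length = bl.length) :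
    (∀ i ∈ PySem.List.pyRange 0 (al.length : Int) 1,
        PySem.List.pyGetD al i ' ' = PySem.List.pyGetD bl ((bl.length : Int) - 1 - i) ' ') ↔ al = bl.reverse := by
  constructor
  · intro h
    apply List.ext_getElem (by simpa using hlen)
    intro k hk hk'
    have hkb : k < bl.length := by omega
    have hmem : ((k : Int)) ∈ PySem.List.pyRange 0 (al.length : Int) 1 := by
      rw [PySem.List.mem_pyRange_one]; omega
    have h3 := h _ hmem
    have hidx : ((bl.length : Int) - 1 - (k : Int)) = ((bl.length - 1 - k : Nat) : Int) := by omega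
    rw [hidx] at h3
    have hlt : bl.length - 1 - k < bl.length := by omega
    rw [List.getElem_reverse]
    simpa [List.getD_eq_getElem, hk, hlt] using h3
  · rintro rfl
    intro i hmem
    rw [PySem.List.mem_pyRange_one] at hmem
    obtain ⟨h0, h1⟩ := hmem
    obtain ⟨k, rfl⟩ : ∃ k : Nat, i = (k : Int) := ⟨i.toNat, by omega⟩
    have hk : k < bl.length := by
      have := h1
      simp at this
      omega
    have e2 : (bl.length : Int) - 1 - (k : Int) = ((bl.length - 1 - k : Nat) : Int) := by omega
    rw [e2]
    have hlt : bl.length - 1 - k < bl.length := by omega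
    have hkr : k < bl.reverse.length := by simpa using hk
    simp [hk, hlt, List.getElem_reverse]

theorem rownowazne_list (al bl : List Char) :
    (if ((al.length : Int) ≠ (bl.length : Int)) then false
     else
       if ((PySem.List.pyRange 0 (al.length : Int) 1).foldl
            (fun res i => if PySem.List.pyGetD al i ' ' ≠ PySem.List.pyGetD bl i ' ' then false else res) true) = true
       then (PySem.List.pyRange 0 (al.length : Int) 1).foldl
            (fun res i => if PySem.List.pyGetD al i ' ' ≠ PySem.List.pyGetD bl i ' ' then false else res) true
       else (PySem.List.pyRange 0 (al.length : Int) 1).foldl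
            (fun res i => if PySem.List.pyGetD al i ' ' ≠ PySem.List.pyGetD bl ((bl.length : Int) - 1 - i) ' ' then false else res) true) = true
    ↔ (al = bl ∨ al = bl.reverse) := by
  by_cases hlen : (al.length : Int) ≠ (bl.length : Int)
  · rw [if_pos hlen]
    have hne : al ≠ bl := fun h => hlen (by rw [h])
    have hne' : al ≠ bl.reverse := fun h => hlen (by rw [h]; simp)
    simp [hne, hne']
  · rw [if_neg hlen, pv_flag_loop, pv_flag_loop]
    have hl : al.length = bl.length := by omega
    simp only [Bool.true_and]
    by_cases heq : al = bl
    · have hcond : (∀ i ∈ PySem.List.pyRange 0 (al.length : Int) 1,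
          ¬ PySem.List.pyGetD al i ' ' ≠ PySem.List.pyGetD bl i ' ') := by
        intro i hi
        exact not_not.mpr ((pv_eq_check al bl hl).2 heq i hi)
      simp [heq]
    · have hcond : ¬ (∀ i ∈ PySem.List.pyRange 0 (al.length : Int) 1,
          ¬ PySem.List.pyGetD al i ' ' ≠ PySem.List.pyGetD bl i ' ') := by
        intro hforall
        exact heq ((pv_eq_check al bl hl).1 (fun i hi => not_not.mp (hforall i hi)))
      rw [if_neg (by simpa using hcond)]
      simp only [decide_eq_true_eq, not_not]
      rw [pv_rev_check al bl hl]
      simp [heq]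

theorem rownowazne_eq (a b : String) :
    rownowazne a b = true ↔ (a.toList = b.toList ∨ a.toList = b.toList.reverse) :=
  rownowazne_list a.toList b.toList

theorem pvCanonL_eq_iff (x y : List Char) :
    pvCanonL x = pvCanonL y ↔ (x = y ∨ x = y.reverse) := by
  unfold pvCanonL
  constructor
  · intro h
    split_ifs at h with h1 h2 h2
    · exact Or.inl h
    · exact Or.inr h
    · exact Or.inr (by rw [← h, List.reverse_reverse])
    · exact Or.inl (List.reverse_inj.1 h)
  · rintro (rfl | rfl)
    · rfl
    · rw [List.reverse_reverse]
      split_ifs with h1 h2 h2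
      · exact le_antisymm h1 h2
      · rfl
      · rfl
      · rcases le_total y.reverse y with h | h
        · exact absurd h h1
        · exact absurd h h2

theorem rownowazne_iff_canon (a b : String) :
    rownowazne a b = true ↔ pvCanon a = pvCanon b := by
  rw [rownowazne_eq, ← pvCanonL_eq_iff]
  constructor
  · intro h
    apply String.toList_inj.mp
    rw [pvCanon_toList, pvCanon_toList, h]
  · intro h
    rw [← pvCanon_toList, ← pvCanon_toList, h]

theorem pv_ite_max (s v : Int) : (if v > s then v else s) = max s v := by
  rw [max_def]; split_ifs <;> omega

theorem pv_foldl_max_eq (l1 l2 : List Int) (a : Int) (h : ∀ v, v ∈ l1 ↔ v ∈ l2) :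
    l1.foldl max a = l2.foldl max a := by
  apply le_antisymm
  · rcases PySem.List.foldl_max_mem l1 a with h1 | h1
    · rw [h1]; exact (PySem.List.le_foldl_max l2 a).1
    · exact (PySem.List.le_foldl_max l2 a).2 _ ((h _).1 h1)
  · rcases PySem.List.foldl_max_mem l2 a with h1 | h1
    · rw [h1]; exact (PySem.List.le_foldl_max l1 a).1
    · exact (PySem.List.le_foldl_max l1 a).2 _ ((h _).2 h1)

-- A computes the running max, over x ∈ T, of the number of canonical-equal elements
theorem strong_string_eq_fold (T : List String) :
    strong_string T =
      (T.map (fun x => ((T.map pvCanon).count (pvCanon x) : Int))).foldl max 1 := by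
  unfold strong_string
  rw [PySem.List.foldl_pyRange_zero_pyGetD' T ""
      (fun s x =>
        let loc_s := (PySem.List.pyRange 0 (T.length : Int) 1).foldl
          (fun loc j => if rownowazne x (PySem.List.pyGetD T j "") then loc + 1 else loc) (0 : Int)
        if loc_s > s then loc_s else s) 1]
  rw [List.foldl_map]
  apply PySem.List.foldl_congr_mem
  intro s x _
  have hinner : (PySem.List.pyRange 0 (T.length : Int) 1).foldl
      (fun loc j => if rownowazne x (PySem.List.pyGetD T j "") then loc + 1 else loc) (0 : Int)
      = ((T.map pvCanon).count (pvCanon x) : Int) := by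
    rw [PySem.List.foldl_pyRange_zero_pyGetD' T ""
        (fun loc t => if rownowazne x t then loc + 1 else loc) 0]
    rw [PySem.List.foldl_if_add_one]
    have hcnt : T.countP (fun t => rownowazne x t) = (T.map pvCanon).count (pvCanon x) := by
      rw [List.count_eq_countP, List.countP_map]
      apply List.countP_congr
      intro t _
      rw [rownowazne_iff_canon]
      simp only [Function.comp_apply, beq_iff_eq]
      exact eq_comm
    rw [hcnt]; ring
  simp only [hinner, pv_ite_max]

theorem strong_string_alt_eq_fold (T : List String) :
    strong_string_alt T =
      ((PySem.Set.ofList (T.map pvCanon)).map (fun k => ((T.map pvCanon).count k : Int))).foldl max 1 := by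
  unfold strong_string_alt
  have hbody : (fun (d : PySem.Dict String Int) (s : String) =>
      let r := (PySem.Str.slice? s none none (-1)).getD ""
      let k := if s.toList ≤ r.toList then s else r
      d.insert k (d.getD k 0 + 1))
      = fun d s => d.insert (pvCanon s) (d.getD (pvCanon s) 0 + 1) := by
    funext d s
    simp only [PySem.Str.slice?_none_none_neg_one, Option.getD_some, String.toList_ofList]
    unfold pvCanon pvRev
    split_ifs <;> rfl
  simp only [hbody]
  have hcounter : T.foldl (fun d s => d.insert (pvCanon s) (d.getD (pvCanon s) 0 + 1)) PySem.Dict.empty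
      = PySem.Dict.counter (T.map pvCanon) := by
    rw [← PySem.Dict.foldl_insert_getD_add_one_eq_counter, List.foldl_map]
  simp only [hcounter]
  have hvals : (PySem.Dict.counter (T.map pvCanon)).values
      = (PySem.Set.ofList (T.map pvCanon)).map (fun k => ((T.map pvCanon).count k : Int)) := by
    unfold PySem.Dict.values
    rw [PySem.Dict.items_counter, List.map_map]
    rfl
  rw [hvals]
  apply PySem.List.foldl_congr_mem
  intro s v _
  exact pv_ite_max s v

-- ===== VERDICT (by name: the statement is the Claim_ definition above) =====
theorem strong_string_spec : Claim_equal_strong_string := by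
  intro T _
  unfold Spec_strong_string
  rw [strong_string_eq_fold, strong_string_alt_eq_fold]
  apply pv_foldl_max_eq
  intro v
  constructor
  · intro hv
    rcases List.mem_map.1 hv with ⟨x, hxT, rfl⟩
    exact List.mem_map.2 ⟨pvCanon x, (PySem.Set.mem_ofList _ _).2 (List.mem_map_of_mem hxT), rfl⟩
  · intro hv
    rcases List.mem_map.1 hv with ⟨k, hk, rfl⟩
    have hkL : k ∈ T.map pvCanon := (PySem.Set.mem_ofList _ _).1 hk
    rcases List.mem_map.1 hkL with ⟨x, hxT, rfl⟩
    exact List.mem_map.2 ⟨x, hxT, rfl⟩
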